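-- pv_equiv track=rewrite | github.com/augustedupin123/python_practice | p_5_shortestwindow.py | shortestwindow
-- ===== SOURCE A (Python) =====
-- def shortestwindow(str1):
--     list1 = []
--     list2 = []
--     list3 = []
--     for i in range(len(str1)):
--         for j in range(len(str1),i,-1):
--             list1.append(str1[i:j])
--     for k in range(len(str1)):
--         if str1[k] not in str1[k+1:]:
--             list2.append(str1[k])
--     for s in range(len(list1)):
--         val = 0
--         for x in list2:
--             if x not in list1[s]:
--                 val = 1
--         if(val==0):
--             list3.append(list1[s])
--     return(len(min(list3, key=len)))
-- ===== SOURCE B (Python) =====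
-- def shortestwindow(str1):
--     # For each start index, extend right only until every distinct character
--     # of str1 has been seen, then stop; keep the smallest window length.
--     distinct = set(str1)
--     n = len(str1)
--     best = None
--     for i in range(n):
--         seen = set()
--         for j in range(i, n):
--             seen.add(str1[j])
--             if distinct.issubset(seen):
--                 w = j - i + 1
--                 if best is None or w < best:
--                     best = w
--                 break
--     return best
-- ===== Notes on version B (the rewrite author's own statement) =====
-- stated objective: alternative
-- what changed: Instead of materializing every substring, computing last occurrences and filtering (A's three passes plus min-by-length), B scans from each start index and extends only until all distinct characters have been seen, keeping the minimal window length (measured much faster on mid-size inputs, but not confirmed at the largest size, so no speed claim is made).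
import Mathlib
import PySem

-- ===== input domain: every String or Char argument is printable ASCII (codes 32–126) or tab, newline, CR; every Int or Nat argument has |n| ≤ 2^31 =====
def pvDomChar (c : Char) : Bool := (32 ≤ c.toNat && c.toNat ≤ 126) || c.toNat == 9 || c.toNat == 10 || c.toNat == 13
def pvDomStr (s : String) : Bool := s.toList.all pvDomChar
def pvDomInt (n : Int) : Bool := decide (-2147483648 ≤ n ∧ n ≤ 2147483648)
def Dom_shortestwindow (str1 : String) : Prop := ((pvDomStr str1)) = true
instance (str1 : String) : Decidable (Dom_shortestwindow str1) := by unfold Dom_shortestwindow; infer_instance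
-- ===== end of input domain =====

-- B replaces A's enumerate-all-substrings-and-filter scheme by a per-start scan
-- that stops as soon as every distinct character has been seen. On the empty
-- string A raises ValueError (min of an empty list) and B returns None, not an
-- int, so Pre_ excludes it.

-- ===== PORT A =====
def shortestwindow (str1 : String) : Int :=
  let s := str1.toList
  let n : Int := (s.length : Int)
  let list1 := (PySem.List.pyRange 0 n 1).foldl (fun acc i =>
      (PySem.List.pyRange n i (-1)).foldl
        (fun acc2 j => acc2 ++ [PySem.List.slice s (some i) (some j)]) acc) []
  let list2 := (PySem.List.pyRange 0 n 1).foldl (fun acc k =>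
      if (PySem.List.slice s (some (k+1)) none).contains (PySem.List.pyGetD s k ' ') then acc
      else acc ++ [PySem.List.pyGetD s k ' ']) []
  let list3 := (PySem.List.pyRange 0 (list1.length : Int) 1).foldl (fun acc si =>
      let sub := PySem.List.pyGetD list1 si []
      let val : Int := list2.foldl (fun v x => if sub.contains x then v else 1) 0
      if val = 0 then acc ++ [sub] else acc) []
  match PySem.List.min? list3 (fun w => (w.length : Int)) with
  | some m => (m.length : Int)
  | none => 0

-- ===== PORT B =====
-- inner loop of Source B: consume characters from `rest`, adding them to `seen`,
-- until `distinct` is covered; returns the number of characters consumed.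
def pvScan (distinct : PySem.Set Char) : List Char → PySem.Set Char → Option Nat
  | [], _ => none
  | c :: t, seen =>
    let seen' := seen.add c
    if distinct.issubset seen' then some 1
    else (pvScan distinct t seen').map (· + 1)

-- body of Source B's outer loop: try start index i, update the running best
def pvStep (distinct : PySem.Set Char) (s : List Char) (best : Option Nat) (i : Nat) : Option Nat :=
  match pvScan distinct (s.drop i) PySem.Set.empty with
  | some w =>
    match best with
    | none => some w
    | some b => if w < b then some w else some b
  | none => best

def shortestwindow_alt (str1 : String) : Int :=
  let s := str1.toList
  let distinct := PySem.Set.ofList s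
  let best := (List.range s.length).foldl (pvStep distinct s) none
  match best with
  | some b => (b : Int)
  | none => 0

-- ===== PRECONDITION & SPEC =====
-- Pre_ excludes only the empty string, on which A raises ValueError (min() of an empty list).
def Pre_shortestwindow (str1 : String) : Prop := str1 ≠ ""
instance (str1 : String) : Decidable (Pre_shortestwindow str1) := by unfold Pre_shortestwindow; infer_instance
def pvWitness_shortestwindow : String := "abcab"

def Spec_shortestwindow (str1 : String) (out : Int) : Prop := out = shortestwindow_alt str1
instance (str1 : String) (out : Int) : Decidable (Spec_shortestwindow str1 out) := by unfold Spec_shortestwindow; infer_instance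

-- ===== CLAIM (what is proved, stated in full; the proofs are below) =====
def Claim_equal_shortestwindow : Prop := ∀ (str1 : String), Dom_shortestwindow str1 → Pre_shortestwindow str1 → Spec_shortestwindow str1 (shortestwindow str1)

-- ===== LEMMAS AND PROOFS =====

-- `pre` contains every character of `s` (the filter criterion both programs use)
def pvCovers (s pre : List Char) : Prop := ∀ c ∈ s, c ∈ pre

-- the set of lengths of windows of s that contain every character of s
def pvS (s : List Char) (m : Nat) : Prop :=
  ∃ i, i < s.length ∧ 1 ≤ m ∧ m ≤ s.length - i ∧ pvCovers s ((s.drop i).take m)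

-- ---- A-side normal forms ----
def pvWindows (s : List Char) : List (List Char) :=
  (PySem.List.pyRange 0 (s.length : Int) 1).flatMap (fun i =>
    (PySem.List.pyRange (s.length : Int) i (-1)).map (fun j => PySem.List.slice s (some i) (some j)))

def pvLast (s : List Char) : List Char :=
  ((PySem.List.pyRange 0 (s.length : Int) 1).filter (fun k =>
      !(PySem.List.slice s (some (k+1)) none).contains (PySem.List.pyGetD s k ' '))).map
    (fun k => PySem.List.pyGetD s k ' ')

def pvList3 (s : List Char) : List (List Char) :=
  (pvWindows s).filter (fun sub => (pvLast s).all (fun x => sub.contains x))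

lemma pv_val_eq (sub : List Char) (l : List Char) (v : Int) :
    l.foldl (fun v x => if sub.contains x then v else 1) v
      = if l.all (fun x => sub.contains x) then v else 1 := by
  induction l generalizing v with
  | nil => simp
  | cons x t ih =>
    by_cases h : sub.contains x = true
    · rw [List.foldl_cons, if_pos h, ih, List.all_cons, h, Bool.true_and]
    · have h' : sub.contains x = false := by
        cases hh : sub.contains x
        · rfl
        · exact absurd hh h
      rw [List.foldl_cons, if_neg h, ih, List.all_cons, h', Bool.false_and]
      simp

lemma pv_A_norm (str1 : String) :
    shortestwindow str1 =
      match PySem.List.min? (pvList3 str1.toList) (fun w => (w.length : Int)) with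
      | some m => (m.length : Int)
      | none => 0 := by
  have hg1 : ∀ (s : List Char) (n : Int) (acc : List (List Char)),
      (PySem.List.pyRange 0 n 1).foldl (fun acc i =>
        (PySem.List.pyRange n i (-1)).foldl
          (fun acc2 j => acc2 ++ [PySem.List.slice s (some i) (some j)]) acc) acc
      = acc ++ (PySem.List.pyRange 0 n 1).flatMap (fun i =>
          (PySem.List.pyRange n i (-1)).map (fun j => PySem.List.slice s (some i) (some j))) := by
    intro s n acc
    have hf : (fun (acc : List (List Char)) (i : Int) =>
        (PySem.List.pyRange n i (-1)).foldl
          (fun acc2 j => acc2 ++ [PySem.List.slice s (some i) (some j)]) acc)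
        = (fun acc i => acc ++ (PySem.List.pyRange n i (-1)).map
            (fun j => PySem.List.slice s (some i) (some j))) := by
      funext acc i
      exact PySem.List.foldl_append_singleton_eq_map _ _ _
    rw [hf, PySem.List.foldl_append_eq_flatMap]
  have hg2 : ∀ (s : List Char) (n : Int) (acc : List Char),
      (PySem.List.pyRange 0 n 1).foldl (fun acc k =>
        if (PySem.List.slice s (some (k+1)) none).contains (PySem.List.pyGetD s k ' ') = true then acc
        else acc ++ [PySem.List.pyGetD s k ' ']) acc
      = acc ++ ((PySem.List.pyRange 0 n 1).filter (fun k =>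
          !(PySem.List.slice s (some (k+1)) none).contains (PySem.List.pyGetD s k ' '))).map
          (fun k => PySem.List.pyGetD s k ' ') := by
    intro s n acc
    have hf : (fun (acc : List Char) (k : Int) =>
        if (PySem.List.slice s (some (k+1)) none).contains (PySem.List.pyGetD s k ' ') = true then acc
        else acc ++ [PySem.List.pyGetD s k ' '])
        = (fun acc k =>
            if (!(PySem.List.slice s (some (k+1)) none).contains (PySem.List.pyGetD s k ' ')) = true
            then acc ++ [PySem.List.pyGetD s k ' '] else acc) := by
      funext acc k
      cases h : (PySem.List.slice s (some (k+1)) none).contains (PySem.List.pyGetD s k ' ') <;> simp [h]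
    rw [hf, PySem.List.foldl_append_if]
  have hg1' := (hg1 str1.toList ((str1.toList.length : Int)) []).trans (List.nil_append _)
  have hg2' := (hg2 str1.toList ((str1.toList.length : Int)) []).trans (List.nil_append _)
  simp only [shortestwindow]
  rw [hg1', hg2']
  have hf : (fun (acc : List (List Char)) (sub : List Char) =>
      if ((pvLast str1.toList).foldl (fun v x => if sub.contains x then v else (1 : Int)) 0 = 0)
      then acc ++ [sub] else acc)
      = (fun acc sub =>
          if ((pvLast str1.toList).all (fun x => sub.contains x)) = true then acc ++ [sub] else acc) := by
    funext acc sub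
    rw [pv_val_eq]
    cases h : (pvLast str1.toList).all (fun x => sub.contains x) <;> simp [h]
  have e1 : pvWindows str1.toList = (PySem.List.pyRange 0 ((str1.toList.length : Int)) 1).flatMap (fun i =>
      (PySem.List.pyRange ((str1.toList.length : Int)) i (-1)).map (fun j => PySem.List.slice str1.toList (some i) (some j))) := rfl
  have e2 : pvLast str1.toList = ((PySem.List.pyRange 0 ((str1.toList.length : Int)) 1).filter (fun k =>
      !(PySem.List.slice str1.toList (some (k+1)) none).contains (PySem.List.pyGetD str1.toList k ' '))).map
      (fun k => PySem.List.pyGetD str1.toList k ' ') := rfl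
  rw [← e1, ← e2]
  have hS : (PySem.List.pyRange 0 (((pvWindows str1.toList).length : Int)) 1).foldl
      (fun acc si =>
        if ((pvLast str1.toList).foldl
              (fun v x => if (PySem.List.pyGetD (pvWindows str1.toList) si []).contains x then v else (1 : Int)) 0 = 0)
        then acc ++ [PySem.List.pyGetD (pvWindows str1.toList) si []] else acc) []
      = pvList3 str1.toList := by
    refine Eq.trans (PySem.List.foldl_pyRange_zero_pyGetD' (pvWindows str1.toList) []
      (fun acc sub =>
        if ((pvLast str1.toList).foldl (fun v x => if sub.contains x then v else (1 : Int)) 0 = 0)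
        then acc ++ [sub] else acc) []) ?_
    refine Eq.trans (congrArg (fun g => List.foldl g ([] : List (List Char)) (pvWindows str1.toList)) hf) ?_
    refine Eq.trans (PySem.List.foldl_append_if_eq_filter
      (fun sub => (pvLast str1.toList).all (fun x => sub.contains x)) (pvWindows str1.toList) []) ?_
    simp [pvList3]
  rw [hS]

lemma pv_mem_windows {s : List Char} {w : List Char} :
    w ∈ pvWindows s ↔ ∃ i j : ℕ, i < j ∧ j ≤ s.length ∧ w = (s.drop i).take (j - i) := by
  unfold pvWindows
  simp only [List.mem_flatMap, List.mem_map, PySem.List.mem_pyRange_one, PySem.List.mem_pyRange_neg_one]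
  constructor
  · rintro ⟨i, ⟨hi0, hin⟩, j, ⟨hij, hjn⟩, hw⟩
    refine ⟨i.toNat, j.toNat, by omega, by omega, ?_⟩
    have hi : ((i.toNat : ℕ) : Int) = i := Int.toNat_of_nonneg hi0
    have hj : ((j.toNat : ℕ) : Int) = j := Int.toNat_of_nonneg (by omega)
    rw [← hi, ← hj, PySem.List.slice_natCast] at hw
    exact hw.symm
  · rintro ⟨i, j, hij, hjn, hw⟩
    refine ⟨(i : Int), ⟨by omega, by omega⟩, (j : Int), ⟨by exact_mod_cast hij, by exact_mod_cast hjn⟩, ?_⟩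
    rw [PySem.List.slice_natCast]
    exact hw.symm

lemma pv_lastOcc_exists {s : List Char} {c : Char} (h : c ∈ s) :
    ∃ k, k < s.length ∧ s.getD k ' ' = c ∧ c ∉ s.drop (k+1) := by
  induction s with
  | nil => cases h
  | cons a t ih =>
    by_cases hc : c ∈ t
    · obtain ⟨k, hk, hg, hd⟩ := ih hc
      exact ⟨k + 1, by simp; omega, by simpa using hg, by simpa using hd⟩
    · have hca : c = a := by
        rcases List.mem_cons.mp h with h' | h'
        · exact h'
        · exact absurd h' hc
      exact ⟨0, by simp, by simp [hca], by simpa using hc⟩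

lemma pv_mem_last {s : List Char} {c : Char} : c ∈ pvLast s ↔ c ∈ s := by
  unfold pvLast
  simp only [List.mem_map, List.mem_filter, PySem.List.mem_pyRange_one]
  constructor
  · rintro ⟨k, ⟨⟨hk0, hkn⟩, _⟩, hg⟩
    have hk : ((k.toNat : ℕ) : Int) = k := Int.toNat_of_nonneg hk0
    rw [← hk, PySem.List.pyGetD_natCast] at hg
    have hlt : k.toNat < s.length := by omega
    rw [List.getD_eq_getElem s ' ' hlt] at hg
    exact hg ▸ List.getElem_mem hlt
  · intro hc
    obtain ⟨k, hk, hg, hd⟩ := pv_lastOcc_exists hc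
    refine ⟨(k : Int), ⟨⟨by omega, by omega⟩, ?_⟩, ?_⟩
    · have hkk : (k : Int) + 1 = ((k + 1 : ℕ) : Int) := by push_cast; ring
      rw [hkk, PySem.List.slice_from_natCast, PySem.List.pyGetD_natCast, hg]
      simp only [Bool.not_eq_true']
      exact (Bool.not_eq_true _).mp (by simpa using hd)
    · rw [PySem.List.pyGetD_natCast, hg]

lemma pv_mem_list3 {s : List Char} {w : List Char} :
    w ∈ pvList3 s ↔ (∃ i j : ℕ, i < j ∧ j ≤ s.length ∧ w = (s.drop i).take (j - i)) ∧ pvCovers s w := by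
  unfold pvList3
  rw [List.mem_filter]
  constructor
  · rintro ⟨h1, h2⟩
    refine ⟨pv_mem_windows.mp h1, ?_⟩
    intro c hc
    have hcl : c ∈ pvLast s := pv_mem_last.mpr hc
    have := (List.all_eq_true.mp h2) c hcl
    simpa using this
  · rintro ⟨h1, h2⟩
    refine ⟨pv_mem_windows.mpr h1, ?_⟩
    rw [List.all_eq_true]
    intro c hc
    simpa using h2 c (pv_mem_last.mp hc)

lemma pv_window_length {s : List Char} {i j : ℕ} (hij : i < j) (hjn : j ≤ s.length) :
    ((s.drop i).take (j - i)).length = j - i := by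
  simp [List.length_take, List.length_drop]
  omega

lemma pv_mem_list3_iff_pvS {s : List Char} :
    ∀ m : ℕ, (∃ w ∈ pvList3 s, w.length = m) ↔ pvS s m := by
  intro m
  constructor
  · rintro ⟨w, hw, hlen⟩
    obtain ⟨⟨i, j, hij, hjn, hweq⟩, hcov⟩ := pv_mem_list3.mp hw
    have hl : w.length = j - i := hweq ▸ pv_window_length hij hjn
    refine ⟨i, by omega, by omega, by omega, ?_⟩
    have : m = j - i := by omega
    rw [this, ← hweq]
    exact hcov
  · rintro ⟨i, hi, hm1, hm2, hcov⟩
    refine ⟨(s.drop i).take m, ?_, ?_⟩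
    · refine pv_mem_list3.mpr ⟨⟨i, i + m, by omega, by omega, by rw [Nat.add_sub_cancel_left]⟩, ?_⟩
      simpa using hcov
    · have := pv_window_length (s := s) (i := i) (j := i + m) (by omega) (by omega)
      rw [Nat.add_sub_cancel_left] at this
      exact this

lemma pv_s_mem_pvS {s : List Char} (h : s ≠ []) : pvS s s.length := by
  refine ⟨0, by cases s <;> simp_all, by cases s <;> simp_all, by omega, ?_⟩
  intro c hc
  simpa using hc

lemma pv_A_least {str1 : String} (h : str1.toList ≠ []) :
    ∃ m : ℕ, IsLeast {m | pvS str1.toList m} m ∧ shortestwindow str1 = (m : Int) := by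
  have hne : pvList3 str1.toList ≠ [] := by
    obtain ⟨w, hw, _⟩ := (pv_mem_list3_iff_pvS (s := str1.toList) str1.toList.length).mpr (pv_s_mem_pvS h)
    intro hnil
    rw [hnil] at hw
    cases hw
  obtain ⟨mA, hmA⟩ : ∃ mA, PySem.List.min? (pvList3 str1.toList) (fun w => (w.length : Int)) = some mA := by
    cases hm : PySem.List.min? (pvList3 str1.toList) (fun w => (w.length : Int)) with
    | none =>
      rw [PySem.List.min?_eq_none_iff] at hm
      exact absurd hm hne
    | some m => exact ⟨m, rfl⟩
  refine ⟨mA.length, ⟨?_, ?_⟩, ?_⟩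
  · exact (pv_mem_list3_iff_pvS _).mp ⟨mA, PySem.List.min?_mem hmA, rfl⟩
  · intro m hm
    obtain ⟨w, hw, hlen⟩ := (pv_mem_list3_iff_pvS m).mpr hm
    have := PySem.List.min?_isMin hmA w hw
    simp only at this
    omega
  · rw [pv_A_norm, hmA]

-- ---- B side ----

-- what `seen ∪ pre` covering `distinct` means during the scan
def pvCovC (D : PySem.Set Char) (seen : PySem.Set Char) (pre : List Char) : Prop :=
  ∀ c ∈ D, c ∈ seen ∨ c ∈ pre

lemma pv_scan_spec (D : PySem.Set Char) :
    ∀ (rest : List Char) (seen : PySem.Set Char), D.issubset seen = false →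
      (∀ m, pvScan D rest seen = some m →
        (1 ≤ m ∧ m ≤ rest.length ∧ pvCovC D seen (rest.take m) ∧
          ∀ m', pvCovC D seen (rest.take m') → m ≤ m'))
      ∧ (pvScan D rest seen = none → ∀ m', ¬ pvCovC D seen (rest.take m')) := by
  intro rest
  induction rest with
  | nil =>
    intro seen hsub
    constructor
    · intro m hm
      simp [pvScan] at hm
    · intro _ m'
      simp only [List.take_nil]
      intro hcov
      have : D.issubset seen = true := by
        rw [PySem.Set.issubset_iff]
        intro x hx
        rcases hcov x hx with h | h
        · exact h
        · cases h
      rw [this] at hsub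
      cases hsub
  | cons c t ih =>
    intro seen hsub
    have hnil : ¬ pvCovC D seen [] := by
      intro hcov
      have : D.issubset seen = true := by
        rw [PySem.Set.issubset_iff]
        intro x hx
        rcases hcov x hx with h | h
        · exact h
        · cases h
      rw [this] at hsub
      cases hsub
    by_cases hss : D.issubset (seen.add c) = true
    · constructor
      · intro m hm
        simp only [pvScan, hss, if_true] at hm
        obtain rfl : (1 : ℕ) = m := Option.some.inj hm
        refine ⟨le_refl 1, by simp, ?_, ?_⟩
        · intro x hx
          rcases (PySem.Set.issubset_iff _ _).mp hss x hx with h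
          rcases (PySem.Set.mem_add seen c x).mp h with h' | h'
          · exact Or.inl h'
          · exact Or.inr (by simp [h'])
        · intro m' hcov
          rcases Nat.eq_zero_or_pos m' with rfl | h
          · exact absurd (by simpa using hcov) hnil
          · omega
      · intro hm
        simp [pvScan, hss] at hm
    · have hss' : D.issubset (seen.add c) = false := by
        cases h : D.issubset (seen.add c)
        · rfl
        · exact absurd h hss
      have ihc := ih (seen.add c) hss'
      have hstep : ∀ (m' : ℕ), pvCovC D seen ((c :: t).take (m' + 1)) ↔ pvCovC D (seen.add c) (t.take m') := by
        intro m'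
        unfold pvCovC
        constructor
        · intro hcov x hx
          rcases hcov x hx with h | h
          · exact Or.inl ((PySem.Set.mem_add seen c x).mpr (Or.inl h))
          · simp only [List.take_succ_cons, List.mem_cons] at h
            rcases h with h | h
            · exact Or.inl ((PySem.Set.mem_add seen c x).mpr (Or.inr h))
            · exact Or.inr h
        · intro hcov x hx
          rcases hcov x hx with h | h
          · rcases (PySem.Set.mem_add seen c x).mp h with h' | h'
            · exact Or.inl h'
            · exact Or.inr (by simp [h'])
          · exact Or.inr (by simp [h])
      constructor
      · intro m hm
        simp only [pvScan, hss', Bool.false_eq_true, if_false, Option.map_eq_some_iff] at hm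
        obtain ⟨m0, hm0, rfl⟩ := hm
        obtain ⟨h1, h2, h3, h4⟩ := (ihc.1 m0 hm0)
        refine ⟨by omega, by simp; omega, (hstep m0).mpr h3, ?_⟩
        intro m' hcov
        rcases Nat.eq_zero_or_pos m' with rfl | h
        · exact absurd (by simpa using hcov) hnil
        · obtain ⟨k, rfl⟩ : ∃ k, m' = k + 1 := ⟨m' - 1, by omega⟩
          have := h4 k ((hstep k).mp hcov)
          omega
      · intro hm m'
        simp only [pvScan, hss', Bool.false_eq_true, if_false, Option.map_eq_none_iff] at hm
        rcases Nat.eq_zero_or_pos m' with rfl | h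
        · simpa using hnil
        · obtain ⟨k, rfl⟩ : ∃ k, m' = k + 1 := ⟨m' - 1, by omega⟩
          intro hcov
          exact (ihc.2 hm k) ((hstep k).mp hcov)

lemma pv_empty_not_sub {s : List Char} (h : s ≠ []) :
    (PySem.Set.ofList s).issubset (PySem.Set.empty : PySem.Set Char) = false := by
  cases hss : (PySem.Set.ofList s).issubset (PySem.Set.empty : PySem.Set Char)
  · rfl
  · exfalso
    obtain ⟨c, hc⟩ : ∃ c, c ∈ s := by
      cases s with
      | nil => exact absurd rfl h
      | cons a t => exact ⟨a, List.mem_cons_self⟩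
    have := (PySem.Set.issubset_iff _ _).mp hss c ((PySem.Set.mem_ofList s c).mpr hc)
    simpa [PySem.Set.empty] using this

lemma pv_covC_empty_iff {s pre : List Char} :
    pvCovC (PySem.Set.ofList s) (PySem.Set.empty : PySem.Set Char) pre ↔ pvCovers s pre := by
  unfold pvCovC pvCovers
  constructor
  · intro h c hc
    rcases h c ((PySem.Set.mem_ofList s c).mpr hc) with h' | h'
    · simp [PySem.Set.empty] at h'
    · exact h'
  · intro h c hc
    exact Or.inr (h c ((PySem.Set.mem_ofList s c).mp hc))

-- per-start characterization of pvScan on the suffix s.drop i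
lemma pv_scan_drop {s : List Char} (h : s ≠ []) (i : ℕ) :
    (∀ m, pvScan (PySem.Set.ofList s) (s.drop i) PySem.Set.empty = some m →
      (1 ≤ m ∧ m ≤ s.length - i ∧ pvCovers s ((s.drop i).take m) ∧
        ∀ m', pvCovers s ((s.drop i).take m') → m ≤ m'))
    ∧ (pvScan (PySem.Set.ofList s) (s.drop i) PySem.Set.empty = none →
        ∀ m', ¬ pvCovers s ((s.drop i).take m')) := by
  have hspec := pv_scan_spec (PySem.Set.ofList s) (s.drop i) PySem.Set.empty (pv_empty_not_sub h)
  constructor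
  · intro m hm
    obtain ⟨h1, h2, h3, h4⟩ := hspec.1 m hm
    refine ⟨h1, by simpa using h2, pv_covC_empty_iff.mp h3, fun m' hc => h4 m' (pv_covC_empty_iff.mpr hc)⟩
  · intro hm m' hc
    exact hspec.2 hm m' (pv_covC_empty_iff.mpr hc)

-- the set of admissible lengths for start indices below k
def pvSbnd (s : List Char) (k : ℕ) (m : ℕ) : Prop :=
  ∃ i, i < k ∧ 1 ≤ m ∧ m ≤ s.length - i ∧ pvCovers s ((s.drop i).take m)

lemma pv_fold_inv {s : List Char} (h : s ≠ []) (k : ℕ) :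
    (∀ b, (List.range k).foldl (pvStep (PySem.Set.ofList s) s) none = some b →
      pvSbnd s k b ∧ ∀ m, pvSbnd s k m → b ≤ m)
    ∧ ((List.range k).foldl (pvStep (PySem.Set.ofList s) s) none = none →
      ∀ m, ¬ pvSbnd s k m) := by
  induction k with
  | zero =>
    constructor
    · intro b hb
      simp at hb
    · intro _ m hm
      obtain ⟨i, hi, _⟩ := hm
      omega
  | succ k ih =>
    rw [List.range_succ, List.foldl_append, List.foldl_cons, List.foldl_nil]
    simp only [pvStep]
    have hS : ∀ m, pvSbnd s (k+1) m ↔ pvSbnd s k m ∨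
        (1 ≤ m ∧ m ≤ s.length - k ∧ pvCovers s ((s.drop k).take m)) := by
      intro m
      unfold pvSbnd
      constructor
      · rintro ⟨i, hi, h1, h2, h3⟩
        rcases Nat.lt_succ_iff_lt_or_eq.mp hi with hik | rfl
        · exact Or.inl ⟨i, hik, h1, h2, h3⟩
        · exact Or.inr ⟨h1, h2, h3⟩
      · rintro (⟨i, hi, h1, h2, h3⟩ | ⟨h1, h2, h3⟩)
        · exact ⟨i, by omega, h1, h2, h3⟩
        · exact ⟨k, by omega, h1, h2, h3⟩
    cases hacc : (List.range k).foldl (pvStep (PySem.Set.ofList s) s) none with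
    | none =>
      have hemp := ih.2 hacc
      cases hscan : pvScan (PySem.Set.ofList s) (s.drop k) PySem.Set.empty with
      | none =>
        constructor
        · intro b hb
          simp [hscan] at hb
        · intro _ m hm
          rcases (hS m).mp hm with h' | ⟨_, _, h3⟩
          · exact hemp m h'
          · exact (pv_scan_drop h k).2 hscan m h3
      | some w =>
        constructor
        · intro b hb
          simp only [hscan] at hb
          obtain rfl : w = b := Option.some.inj hb
          obtain ⟨h1, h2, h3, h4⟩ := (pv_scan_drop h k).1 w hscan
          refine ⟨(hS w).mpr (Or.inr ⟨h1, h2, h3⟩), ?_⟩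
          intro m hm
          rcases (hS m).mp hm with h' | ⟨_, _, hcov⟩
          · exact absurd h' (hemp m)
          · exact h4 m hcov
        · intro hb
          simp [hscan] at hb
    | some b0 =>
      obtain ⟨hmem, hlb⟩ := ih.1 b0 hacc
      cases hscan : pvScan (PySem.Set.ofList s) (s.drop k) PySem.Set.empty with
      | none =>
        constructor
        · intro b hb
          simp only [hscan] at hb
          obtain rfl : b0 = b := Option.some.inj hb
          refine ⟨(hS b0).mpr (Or.inl hmem), ?_⟩
          intro m hm
          rcases (hS m).mp hm with h' | ⟨_, _, h3⟩
          · exact hlb m h'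
          · exact absurd h3 ((pv_scan_drop h k).2 hscan m)
        · intro hb
          simp [hscan] at hb
      | some w =>
        obtain ⟨hw1, hw2, hw3, hw4⟩ := (pv_scan_drop h k).1 w hscan
        constructor
        · intro b hb
          simp only [hscan] at hb
          by_cases hlt : w < b0
          · rw [if_pos hlt] at hb
            obtain rfl : w = b := Option.some.inj hb
            refine ⟨(hS w).mpr (Or.inr ⟨hw1, hw2, hw3⟩), ?_⟩
            intro m hm
            rcases (hS m).mp hm with h' | ⟨_, _, hcov⟩
            · have := hlb m h'
              omega
            · exact hw4 m hcov
          · rw [if_neg hlt] at hb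
            obtain rfl : b0 = b := Option.some.inj hb
            refine ⟨(hS b0).mpr (Or.inl hmem), ?_⟩
            intro m hm
            rcases (hS m).mp hm with h' | ⟨_, _, hcov⟩
            · exact hlb m h'
            · have := hw4 m hcov
              omega
        · intro hb
          by_cases hlt : w < b0 <;> simp [hscan, hlt] at hb

lemma pv_B_least {str1 : String} (h : str1.toList ≠ []) :
    ∃ m : ℕ, IsLeast {m | pvS str1.toList m} m ∧ shortestwindow_alt str1 = (m : Int) := by
  have hinv := pv_fold_inv h str1.toList.length
  have hSfull : ∀ m, pvSbnd str1.toList str1.toList.length m ↔ pvS str1.toList m := by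
    intro m
    unfold pvSbnd pvS
    exact Iff.rfl
  have hdef : shortestwindow_alt str1
      = (match (List.range str1.toList.length).foldl
            (pvStep (PySem.Set.ofList str1.toList) str1.toList) none with
         | some b => ((b : ℕ) : Int)
         | none => 0) := rfl
  cases hacc : (List.range str1.toList.length).foldl
      (pvStep (PySem.Set.ofList str1.toList) str1.toList) none with
  | none =>
    exfalso
    exact (hinv.2 hacc) str1.toList.length
      ((hSfull str1.toList.length).mpr (pv_s_mem_pvS h))
  | some b =>
    obtain ⟨hmem, hlb⟩ := hinv.1 b hacc
    refine ⟨b, ⟨(hSfull b).mp hmem, fun m hm => hlb m ((hSfull m).mpr hm)⟩, ?_⟩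
    rw [hdef, hacc]

-- ===== VERDICT (by name: the statement is the Claim_ definition above) =====
theorem shortestwindow_spec : Claim_equal_shortestwindow := by
  intro str1 _ hpre
  unfold Spec_shortestwindow
  have h : str1.toList ≠ [] := by
    intro hnil
    exact hpre (String.toList_eq_nil_iff.mp hnil)
  obtain ⟨mA, hA, hAeq⟩ := pv_A_least h
  obtain ⟨mB, hB, hBeq⟩ := pv_B_least h
  have : mA = mB := le_antisymm (hA.2 hB.1) (hB.2 hA.1)
  rw [hAeq, hBeq, this]
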